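-- pv_equiv track=rewrite | github.com/vinchinzu/euler | python/313.py | count_prime_square_grids
-- ===== SOURCE A (Python) =====
-- from math import isqrt
-- from typing import List
--
-- def sieve_primes(limit: int) -> List[int]:
--     """Return all primes strictly less than ``limit`` via a standard sieve."""
--
--     if limit <= 2:
--         return []
--
--     sieve = bytearray(b"\x01") * limit
--     sieve[0:2] = b"\x00\x00"
--
--     upper = isqrt(limit - 1)
--     for number in range(2, upper + 1):
--         if sieve[number]:
--             step = number
--             start = number * number
--             sieve[start:limit:step] = b"\x00" * (((limit - start - 1) // step) + 1)
--
--     return [index for index in range(2, limit) if sieve[index]]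
--
-- def count_prime_square_grids(max_prime: int) -> int:
--     """Return number of (m, n) grids with S(m, n) == p^2 for primes p < max."""
--
--     total = 0
--
--     for prime in sieve_primes(max_prime):
--         if prime == 2:
--             continue
--
--         square = prime * prime
--         t_value = (square + 13) // 2
--         a_min = t_value // 4 + 1
--         a_max = (t_value - 2) // 3
--
--         if a_max >= a_min:
--             total += 2 * (a_max - a_min + 1)
--
--     return total
-- ===== SOURCE B (Python) =====
-- from math import isqrt
--
-- def is_prime(n):
--     if n < 2:
--         return False
--     if n % 2 == 0:
--         return n == 2
--     return all(n % d for d in range(3, isqrt(n) + 1, 2))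
--
-- def count_prime_square_grids(max_prime):
--     total = 0
--     for prime in range(3, max_prime):
--         if is_prime(prime):
--             square = prime * prime
--             t_value = (square + 13) // 2
--             a_min = t_value // 4 + 1
--             a_max = (t_value - 2) // 3
--             if a_max >= a_min:
--                 total += 2 * (a_max - a_min + 1)
--     return total
-- ===== Notes on version B (the rewrite author's own statement) =====
-- stated objective: simpler
-- what changed: Replaced the bytearray sieve helper (sieve_primes + the explicit ==2 skip) by a direct trial-division primality test applied in a single range(3, max_prime) scan.
import Mathlib
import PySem

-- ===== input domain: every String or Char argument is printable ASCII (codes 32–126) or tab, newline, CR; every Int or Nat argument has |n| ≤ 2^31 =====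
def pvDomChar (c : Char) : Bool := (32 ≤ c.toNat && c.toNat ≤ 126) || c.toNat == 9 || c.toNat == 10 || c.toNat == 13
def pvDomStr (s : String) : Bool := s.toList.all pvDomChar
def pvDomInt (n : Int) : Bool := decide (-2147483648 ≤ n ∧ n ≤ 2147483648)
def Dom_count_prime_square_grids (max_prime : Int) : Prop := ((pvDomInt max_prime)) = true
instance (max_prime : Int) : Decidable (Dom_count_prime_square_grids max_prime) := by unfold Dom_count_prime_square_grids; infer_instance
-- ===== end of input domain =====

-- B replaces A's sieve helper by a trial-division primality test over a plain range scan: simpler, no sieve array.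

-- ===== PORT A =====
-- the bytearray: ones of length L with sieve[0:2] = b"\x00\x00"
def pvInit (L : Nat) : List Bool := ((List.replicate L true).set 0 false).set 1 false

-- the slice assignment sieve[n*n : L : n] = b"\x00"*count zeroes exactly the
-- positions i < L with n*n ≤ i and (i - n*n) % n == 0, i.e. i % n == 0 (since n ∣ n*n)
def pvMark (s : List Bool) (n : Nat) : List Bool :=
  s.mapIdx (fun i b => if n * n ≤ i ∧ i % n = 0 then false else b)

-- one iteration of the sieve loop body: 'if sieve[number]: … slice assignment …'
def pvSieveStep (s : List Bool) (n : Nat) : List Bool :=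
  if s.getD n false then pvMark s n else s

-- the sieve array after the whole 'for number in range(2, upper + 1)' loop
def pvSieve (L : Nat) : List Bool :=
  (List.range' 2 (Nat.sqrt (L - 1) - 1)).foldl pvSieveStep (pvInit L)

def sieve_primes (limit : Int) : List Int :=
  if limit ≤ 2 then []
  else
    let L := limit.toNat
    let s := pvSieve L
    ((List.range' 2 (L - 2)).filter (fun i => s.getD i false)).map (fun (i : Nat) => (i : Int))

def count_prime_square_grids (max_prime : Int) : Int :=
  (sieve_primes max_prime).foldl (fun total prime =>
    if prime == 2 then total
    else
      let square := prime * prime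
      let t_value := PySem.Int.floordiv (square + 13) 2
      let a_min := PySem.Int.floordiv t_value 4 + 1
      let a_max := PySem.Int.floordiv (t_value - 2) 3
      if a_max ≥ a_min then total + 2 * (a_max - a_min + 1) else total) 0

-- ===== PORT B =====
def is_prime (n : Int) : Bool :=
  if n < 2 then false
  else if PySem.Int.mod n 2 == 0 then n == 2
  else (PySem.List.pyRange 3 ((Nat.sqrt n.toNat : Int) + 1) 2).all
         (fun d => !(PySem.Int.mod n d == 0))

def count_prime_square_grids_alt (max_prime : Int) : Int :=
  (PySem.List.pyRange 3 max_prime 1).foldl (fun total prime =>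
    if is_prime prime then
      let square := prime * prime
      let t_value := PySem.Int.floordiv (square + 13) 2
      let a_min := PySem.Int.floordiv t_value 4 + 1
      let a_max := PySem.Int.floordiv (t_value - 2) 3
      if a_max ≥ a_min then total + 2 * (a_max - a_min + 1) else total
    else total) 0

-- ===== PRECONDITION & SPEC =====
def Spec_count_prime_square_grids (max_prime : Int) (out : Int) : Prop := out = count_prime_square_grids_alt max_prime
instance (max_prime : Int) (out : Int) : Decidable (Spec_count_prime_square_grids max_prime out) := by unfold Spec_count_prime_square_grids; infer_instance

-- ===== CLAIM (what is proved, stated in full; the proofs are below) =====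
def Claim_equal_count_prime_square_grids : Prop := ∀ (max_prime : Int), Dom_count_prime_square_grids max_prime → Spec_count_prime_square_grids max_prime (count_prime_square_grids max_prime)

-- ===== LEMMAS AND PROOFS =====

-- i is struck out after the sieve loop has processed numbers 2..m
def pvMarked (m i : Nat) : Prop := ∃ d, 2 ≤ d ∧ d ≤ m ∧ d * d ≤ i ∧ d ∣ i

lemma pvMark_length (s : List Bool) (n : Nat) : (pvMark s n).length = s.length := by
  simp [pvMark]

lemma pvMark_getD (s : List Bool) (n i : Nat) (h : i < s.length) :
    (pvMark s n).getD i false = if n * n ≤ i ∧ i % n = 0 then false else s.getD i false := by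
  rw [List.getD_eq_getElem _ _ (by rw [pvMark_length]; exact h),
      List.getD_eq_getElem _ _ h]
  simp [pvMark, List.getElem_mapIdx]

lemma pvInit_length (L : Nat) : (pvInit L).length = L := by simp [pvInit]

lemma pvInit_getD (L i : Nat) (h : i < L) : (pvInit L).getD i false = decide (2 ≤ i) := by
  rw [List.getD_eq_getElem _ _ (by rw [pvInit_length]; exact h)]
  simp only [pvInit, List.getElem_set, List.getElem_replicate]
  rcases i with _ | _ | i <;> simp

lemma pvSieve_inv (L : Nat) : ∀ m, 1 ≤ m → m < L →
    ((List.range' 2 (m - 1)).foldl pvSieveStep (pvInit L)).length = L ∧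
    (∀ i, i < L →
      (((List.range' 2 (m - 1)).foldl pvSieveStep (pvInit L)).getD i false = true ↔
        (2 ≤ i ∧ ¬ pvMarked m i))) := by
  intro m
  induction m with
  | zero => omega
  | succ m ih =>
    intro _ hmL
    rcases Nat.eq_zero_or_pos m with hm0 | hm1
    · subst hm0
      simp only [List.range'] -- range' 2 0 = []
      simp only [List.foldl_nil]
      refine ⟨pvInit_length L, ?_⟩
      intro i hiL
      rw [pvInit_getD L i hiL, decide_eq_true_iff]
      constructor
      · intro h; exact ⟨h, by rintro ⟨d, h2, h1, _⟩; omega⟩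
      · intro h; exact h.1
    · have hconcat : List.range' 2 (m + 1 - 1) = List.range' 2 (m - 1) ++ [m + 1] := by
        have : m + 1 - 1 = (m - 1) + 1 := by omega
        rw [this, List.range'_1_concat]
        congr 1; simp; omega
      obtain ⟨ihlen, ihval⟩ := ih hm1 (by omega)
      rw [hconcat, List.foldl_append]
      set s := (List.range' 2 (m - 1)).foldl pvSieveStep (pvInit L) with hs
      simp only [List.foldl_cons, List.foldl_nil]
      have hsplit : ∀ j, pvMarked (m + 1) j ↔
          (pvMarked m j ∨ ((m+1)*(m+1) ≤ j ∧ (m+1) ∣ j)) := by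
        intro j
        constructor
        · rintro ⟨d, h2, hdm, hdd, hdvd⟩
          rcases Nat.lt_or_ge d (m+1) with hlt | hge
          · exact Or.inl ⟨d, h2, by omega, hdd, hdvd⟩
          · have : d = m + 1 := by omega
            subst this; exact Or.inr ⟨hdd, hdvd⟩
        · rintro (⟨d, h2, hdm, hdd, hdvd⟩ | ⟨h1, h3⟩)
          · exact ⟨d, h2, by omega, hdd, hdvd⟩
          · exact ⟨m+1, by omega, le_refl _, h1, h3⟩
      by_cases hsn : s.getD (m + 1) false = true
      · -- m+1 not yet marked: mark its multiples
        have hnm : ¬ pvMarked m (m + 1) := ((ihval (m+1) hmL).mp hsn).2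
        rw [pvSieveStep, if_pos hsn]
        refine ⟨by rw [pvMark_length, ihlen], ?_⟩
        intro i hiL
        rw [pvMark_getD s (m+1) i (by rw [ihlen]; exact hiL)]
        split_ifs with hcond
        · simp only [false_iff]
          rintro ⟨_, hno⟩
          exact hno ((hsplit i).mpr (Or.inr
            ⟨hcond.1, (Nat.dvd_iff_mod_eq_zero).mpr hcond.2⟩))
        · rw [ihval i hiL, hsplit i]
          constructor
          · rintro ⟨h2i, hno⟩
            refine ⟨h2i, ?_⟩
            rintro (h | ⟨h1, h3⟩)
            · exact hno h
            · exact hcond ⟨h1, (Nat.dvd_iff_mod_eq_zero).mp h3⟩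
          · rintro ⟨h2i, hno⟩; exact ⟨h2i, fun h => hno (Or.inl h)⟩
      · -- m+1 already marked: loop body does nothing, and m+1 adds no new marks
        have hm1m : pvMarked m (m + 1) := by
          by_contra hnot
          exact hsn ((ihval (m+1) hmL).mpr ⟨by omega, hnot⟩)
        rw [pvSieveStep, if_neg hsn]
        refine ⟨ihlen, ?_⟩
        intro i hiL
        rw [ihval i hiL]
        have : pvMarked (m + 1) i ↔ pvMarked m i := by
          rw [hsplit i]
          constructor
          · rintro (h | ⟨h1, h3⟩)
            · exact h
            · obtain ⟨e, he2, hem, hee, hedvd⟩ := hm1m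
              refine ⟨e, he2, hem, ?_, hedvd.trans h3⟩
              calc e * e ≤ m + 1 := hee
                _ ≤ (m+1)*(m+1) := Nat.le_mul_of_pos_left _ (by omega)
                _ ≤ i := h1
          · exact Or.inl
        rw [this]

lemma pvSieve_eq_prime (L i : Nat) (h2 : 2 ≤ i) (hiL : i < L) :
    (pvSieve L).getD i false = decide (Nat.Prime i) := by
  have hL3 : 3 ≤ L := by omega
  have hm1 : 1 ≤ Nat.sqrt (L - 1) := by
    rw [Nat.le_sqrt]; omega
  have hmL : Nat.sqrt (L - 1) < L :=
    lt_of_le_of_lt (Nat.sqrt_le_self (L - 1)) (by omega)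
  obtain ⟨_, hval⟩ := pvSieve_inv L (Nat.sqrt (L - 1)) hm1 hmL
  rw [Bool.eq_iff_iff, decide_eq_true_iff, pvSieve]
  rw [hval i hiL]
  constructor
  · rintro ⟨_, hno⟩
    by_contra hnp
    apply hno
    refine ⟨i.minFac, (Nat.minFac_prime (by omega)).two_le, ?_, ?_, Nat.minFac_dvd i⟩
    · rw [Nat.le_sqrt]
      have := Nat.minFac_sq_le_self (by omega : 0 < i) hnp
      rw [pow_two] at this
      omega
    · have := Nat.minFac_sq_le_self (by omega : 0 < i) hnp
      rw [pow_two] at this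
      exact this
  · intro hp
    refine ⟨h2, ?_⟩
    rintro ⟨d, hd2, _, hdd, hdvd⟩
    rcases hp.eq_one_or_self_of_dvd d hdvd with h1 | hself
    · omega
    · subst hself
      have : 2 * d ≤ d * d := Nat.mul_le_mul_right d hd2
      omega

lemma pvIsPrime_eq (n : Int) (h3 : 3 ≤ n) : is_prime n = decide (Nat.Prime n.toNat) := by
  have hnn : (0:Int) ≤ n := by omega
  have hN : (n.toNat : Int) = n := Int.toNat_of_nonneg hnn
  have hN3 : 3 ≤ n.toNat := by omega
  rw [Bool.eq_iff_iff, decide_eq_true_iff]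
  rw [is_prime, if_neg (by omega : ¬ n < 2)]
  by_cases hmod : PySem.Int.mod n 2 = 0
  · have hdvd2 : (2:Int) ∣ n := (PySem.Int.mod_eq_zero_iff_dvd n 2).mp hmod
    have hdvd2' : 2 ∣ n.toNat := by
      rw [← Int.natCast_dvd_natCast]; push_cast [hN]; exact hdvd2
    simp only [hmod]
    constructor
    · intro h; simp at h; omega
    · intro hp
      have := (hp.even_iff).mp (even_iff_two_dvd.mpr hdvd2')
      omega
  · have hodd : ¬ (2:Int) ∣ n := fun h => hmod ((PySem.Int.mod_eq_zero_iff_dvd n 2).mpr h)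
    rw [if_neg (by simpa using hmod)]
    rw [List.all_eq_true]
    constructor
    · -- no odd divisor up to isqrt n  →  prime
      intro hall
      rw [Nat.prime_def_le_sqrt]
      refine ⟨by omega, ?_⟩
      intro m h2m hmsq hmdvd
      by_cases hme : 2 ∣ m
      · apply hodd
        have : (2:Int) ∣ (m : Int) := by exact_mod_cast hme
        calc (2:Int) ∣ (m:Int) := this
          _ ∣ n := by rw [← hN]; exact_mod_cast hmdvd
      · have hm3 : 3 ≤ m := by omega
        have hmem : (m:Int) ∈ PySem.List.pyRange 3 ((Nat.sqrt n.toNat : Int) + 1) 2 := by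
          rw [PySem.List.mem_pyRange_iff_of_pos (by omega : (0:Int) < 2)]
          refine ⟨by exact_mod_cast hm3, by exact_mod_cast (by omega : (m:Int) < (Nat.sqrt n.toNat : Int) + 1), ?_⟩
          omega
        have := hall _ hmem
        simp only [Bool.not_eq_eq_eq_not, Bool.not_true, beq_eq_false_iff_ne, ne_eq] at this
        apply this
        rw [PySem.Int.mod_eq_zero_iff_dvd]
        rw [← hN]
        exact_mod_cast hmdvd
    · -- prime → no odd divisor up to isqrt n
      intro hp d hd
      rw [PySem.List.mem_pyRange_iff_of_pos (by omega : (0:Int) < 2)] at hd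
      obtain ⟨hd3, hdlt, _⟩ := hd
      simp only [Bool.not_eq_eq_eq_not, Bool.not_true, beq_eq_false_iff_ne, ne_eq]
      intro hmod0
      have hddvd : d ∣ n := (PySem.Int.mod_eq_zero_iff_dvd n d).mp hmod0
      have hdN : d.toNat ∣ n.toNat := by
        rw [← Int.natCast_dvd_natCast]
        rw [Int.toNat_of_nonneg (by omega), hN]
        exact hddvd
      rw [Nat.prime_def_le_sqrt] at hp
      refine hp.2 d.toNat (by omega) (by omega) hdN

-- pyRange with step 1 over naturals is a cast of List.range'
lemma pvPyRange_cast (a : Nat) : ∀ (n : Nat),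
    PySem.List.pyRange (a : Int) ((a : Int) + (n : Int)) 1 = (List.range' a n).map (fun (i : Nat) => (i : Int)) := by
  intro n
  induction n with
  | zero => simp [PySem.List.pyRange_one_eq_nil]
  | succ n ih =>
    have h1 : ((a : Int) + ((n+1 : Nat) : Int)) = ((a:Int) + (n:Int)) + 1 := by push_cast; ring
    rw [h1, PySem.List.pyRange_one_succ_right (by omega), ih, List.range'_1_concat]
    simp

-- the main equivalence for max_prime ≥ 3
lemma pvMain (max_prime : Int) (h3 : 3 ≤ max_prime) :
    count_prime_square_grids max_prime = count_prime_square_grids_alt max_prime := by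
  obtain ⟨L, rfl⟩ : ∃ L : Nat, (L : Int) = max_prime :=
    ⟨max_prime.toNat, Int.toNat_of_nonneg (by omega)⟩
  have hL3 : 3 ≤ L := by exact_mod_cast h3
  -- the sieve list is 2 :: (primes in [3, L))
  have hsieve : sieve_primes (L : Int) =
      (2 : Int) :: ((List.range' 3 (L - 3)).filter (fun i => decide (Nat.Prime i))).map (fun (i : Nat) => (i : Int)) := by
    rw [sieve_primes, if_neg (by exact_mod_cast (by omega : ¬ (L:Int) ≤ 2))]
    simp only [Int.toNat_natCast]
    have hfc : (List.range' 2 (L - 2)).filter (fun i => (pvSieve L).getD i false)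
        = (List.range' 2 (L - 2)).filter (fun i => decide (Nat.Prime i)) := by
      apply List.filter_congr
      intro x hx
      rw [List.mem_range'_1] at hx
      exact pvSieve_eq_prime L x hx.1 (by omega)
    have hsplit : List.range' 2 (L - 2) = 2 :: List.range' 3 (L - 3) := by
      have : L - 2 = (L - 3) + 1 := by omega
      rw [this, List.range'_succ]
    rw [hfc, hsplit, List.filter_cons]
    simp [Nat.prime_two]
  -- B's loop is a fold of the arithmetic body over the primes in [3, max_prime)
  have hrange : PySem.List.pyRange 3 (L : Int) 1 = (List.range' 3 (L - 3)).map (fun (i : Nat) => (i : Int)) := by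
    have h0 : ((L : Nat) : Int) = ((3:Nat) : Int) + ((L - 3 : Nat) : Int) := by push_cast; omega
    have h1 : ((3:Nat) : Int) = (3 : Int) := by norm_num
    rw [h0, ← h1, pvPyRange_cast 3 (L - 3)]
  rw [count_prime_square_grids, count_prime_square_grids_alt, hsieve, hrange]
  rw [PySem.List.foldl_if_eq_foldl_filter]
  rw [List.filter_map]
  have hfB : (List.range' 3 (L - 3)).filter ((fun p => is_prime p) ∘ (fun (i : Nat) => (i : Int)))
      = (List.range' 3 (L - 3)).filter (fun i => decide (Nat.Prime i)) := by
    apply List.filter_congr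
    intro x hx
    rw [List.mem_range'_1] at hx
    have h3x : 3 ≤ (x : Int) := by exact_mod_cast hx.1
    simp only [Function.comp_apply]
    rw [pvIsPrime_eq _ h3x]
    simp
  rw [hfB]
  -- peel the leading 2 off A's fold (its body skips it), then the bodies agree
  rw [List.foldl_cons]
  simp only [show ((2:Int) == 2) = true from rfl, if_true]
  apply PySem.List.foldl_congr_mem
  intro acc x hx
  rw [List.mem_map] at hx
  obtain ⟨i, hi, rfl⟩ := hx
  rw [List.mem_filter, List.mem_range'_1] at hi
  have hx2 : ¬ (((i : Int) == 2) = true) := by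
    simp only [beq_iff_eq]
    have : 3 ≤ i := hi.1.1
    omega
  rw [if_neg hx2]

-- ===== VERDICT (by name: the statement is the Claim_ definition above) =====
theorem count_prime_square_grids_spec : Claim_equal_count_prime_square_grids := by
  intro max_prime _
  unfold Spec_count_prime_square_grids
  rcases le_or_gt max_prime 2 with hle | hgt
  · rw [count_prime_square_grids, count_prime_square_grids_alt]
    rw [sieve_primes, if_pos hle]
    rw [PySem.List.pyRange_one_eq_nil (by omega)]
    rfl
  · exact pvMain max_prime (by omega)
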